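-- pv_equiv track=rewrite | github.com/CluelessCoder73/ExactCut-Video-Tools | vdscript_range_adjuster.py | find_last_p_frame_before_next_i
-- ===== SOURCE A (Python) =====
-- def find_last_p_frame_before_next_i(frame_num, frame_types):
--     max_frame = max(frame_types.keys())
--     last_p_frame = None
--     while frame_num <= max_frame:
--         if frame_types.get(frame_num) == 'I' and last_p_frame is not None:
--             return last_p_frame
--         if frame_types.get(frame_num) == 'P':
--             last_p_frame = frame_num
--         frame_num += 1
--     return last_p_frame if last_p_frame is not None else max_frame
-- ===== SOURCE B (Python) =====
-- def find_last_p_frame_before_next_i(frame_num, frame_types):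
--     max_frame = max(frame_types)
--     last_p_frame = None
--     for f in sorted(k for k in frame_types if k >= frame_num):
--         t = frame_types[f]
--         if t == 'I' and last_p_frame is not None:
--             return last_p_frame
--         if t == 'P':
--             last_p_frame = f
--     return last_p_frame if last_p_frame is not None else max_frame
-- ===== Notes on version B (the rewrite author's own statement) =====
-- stated objective: faster
-- what changed: B iterates over the sorted present keys >= frame_num instead of probing every integer in the dense range [frame_num, max_frame], so the cost depends on the number of keys, not on the width of the frame range.
import Mathlib
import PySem

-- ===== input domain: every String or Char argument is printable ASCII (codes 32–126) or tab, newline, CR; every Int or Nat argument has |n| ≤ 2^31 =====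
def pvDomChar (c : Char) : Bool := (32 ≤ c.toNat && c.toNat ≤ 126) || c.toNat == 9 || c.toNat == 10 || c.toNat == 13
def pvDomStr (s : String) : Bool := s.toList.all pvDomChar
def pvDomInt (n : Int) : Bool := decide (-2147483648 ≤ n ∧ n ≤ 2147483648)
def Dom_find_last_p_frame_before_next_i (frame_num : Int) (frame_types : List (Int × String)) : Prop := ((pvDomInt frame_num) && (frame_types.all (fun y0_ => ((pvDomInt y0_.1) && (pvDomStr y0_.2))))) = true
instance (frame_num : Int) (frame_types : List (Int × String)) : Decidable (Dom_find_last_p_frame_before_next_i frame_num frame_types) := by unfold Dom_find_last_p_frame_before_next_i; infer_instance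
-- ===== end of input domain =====

-- B replaces A's dense integer probe over [frame_num, max_frame] by a traversal of the sorted present keys >= frame_num.


-- frame_types.get(k) — first match in the association list (a Python dict has unique keys, so exact)
def pvGet (frame_types : List (Int × String)) (k : Int) : Option String :=
  (frame_types.find? (fun p => p.1 == k)).map Prod.snd

-- ===== PORT A =====
-- the while loop: i steps by 1 while i ≤ maxF; 'return last_p_frame' fires only with last.isSome,
-- so 'last.getD maxF' there is exactly that value
def goA (ft : List (Int × String)) (maxF : Int) (i : Int) (last : Option Int) : Int :=
  if i ≤ maxF then
    if pvGet ft i = some "I" ∧ last.isSome then last.getD maxF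
    else goA ft maxF (i + 1) (if pvGet ft i = some "P" then some i else last)
  else last.getD maxF
termination_by (maxF + 1 - i).toNat
decreasing_by omega

def find_last_p_frame_before_next_i (frame_num : Int) (frame_types : List (Int × String)) : Int :=
  match PySem.List.max? (frame_types.map Prod.fst) (fun x => x) with
  | some maxF => goA frame_types maxF frame_num none
  | none => 0   -- max(keys) of an empty dict raises ValueError: excluded by Pre_

-- ===== PORT B =====
-- the for loop over the sorted keys ≥ frame_num (frame_types[f] with f a present key = pvGet, always some)
def goB (ft : List (Int × String)) (maxF : Int) : List Int → Option Int → Int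
  | [], last => last.getD maxF
  | f :: rest, last =>
    if pvGet ft f = some "I" ∧ last.isSome then last.getD maxF
    else goB ft maxF rest (if pvGet ft f = some "P" then some f else last)

def find_last_p_frame_before_next_i_alt (frame_num : Int) (frame_types : List (Int × String)) : Int :=
  match PySem.List.max? (frame_types.map Prod.fst) (fun x => x) with
  | some maxF =>
      goB frame_types maxF
        (PySem.List.sorted ((frame_types.map Prod.fst).filter (fun k => decide (frame_num ≤ k))) (fun x => x) false)
        none
  | none => 0   -- max() of an empty dict raises ValueError: excluded by Pre_

-- ===== PRECONDITION & SPEC =====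
-- A raises ValueError (max of an empty sequence) exactly on the empty dict; nothing else is excluded.
def Pre_find_last_p_frame_before_next_i (frame_num : Int) (frame_types : List (Int × String)) : Prop :=
  frame_types ≠ []
instance (frame_num : Int) (frame_types : List (Int × String)) : Decidable (Pre_find_last_p_frame_before_next_i frame_num frame_types) := by unfold Pre_find_last_p_frame_before_next_i; infer_instance

def pvWitness_find_last_p_frame_before_next_i : Int × (List (Int × String)) :=
  (0, [(0, "P"), (1, "B"), (2, "I")])

def Spec_find_last_p_frame_before_next_i (frame_num : Int) (frame_types : List (Int × String)) (out : Int) : Prop := out = find_last_p_frame_before_next_i_alt frame_num frame_types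
instance (frame_num : Int) (frame_types : List (Int × String)) (out : Int) : Decidable (Spec_find_last_p_frame_before_next_i frame_num frame_types out) := by unfold Spec_find_last_p_frame_before_next_i; infer_instance

-- ===== CLAIM (what is proved, stated in full; the proofs are below) =====
def Claim_equal_find_last_p_frame_before_next_i : Prop := ∀ (frame_num : Int) (frame_types : List (Int × String)), Dom_find_last_p_frame_before_next_i frame_num frame_types → Pre_find_last_p_frame_before_next_i frame_num frame_types → Spec_find_last_p_frame_before_next_i frame_num frame_types (find_last_p_frame_before_next_i frame_num frame_types)

-- ===== LEMMAS AND PROOFS =====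

lemma pvGet_eq_none_of_not_mem (ft : List (Int × String)) (i : Int)
    (h : i ∉ ft.map Prod.fst) : pvGet ft i = none := by
  simp only [pvGet, Option.map_eq_none_iff, List.find?_eq_none]
  intro p hp
  simp only [beq_iff_eq]
  intro he
  exact h (by simpa [he] using List.mem_map_of_mem (f := Prod.fst) hp)

-- sorted of the ≥ i keys = (all copies of i) ++ sorted of the ≥ i+1 keys
lemma sorted_filter_step (keys : List Int) (i : Int) :
    PySem.List.sorted (keys.filter (fun k => decide (i ≤ k))) (fun x => x) false
      = List.replicate (keys.count i) i
        ++ PySem.List.sorted (keys.filter (fun k => decide (i + 1 ≤ k))) (fun x => x) false := by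
  have h1 : (keys.filter (fun k => decide (i ≤ k))).filter (fun k => k == i)
      = List.replicate (keys.count i) i := by
    rw [List.filter_comm, List.filter_beq]
    refine List.filter_eq_self.mpr (fun a ha => ?_)
    have := List.eq_of_mem_replicate ha
    simp [this]
  have h2 : (keys.filter (fun k => decide (i ≤ k))).filter (fun k => !(k == i))
      = keys.filter (fun k => decide (i + 1 ≤ k)) := by
    rw [List.filter_filter]
    refine List.filter_congr (fun k _ => ?_)
    by_cases h : i + 1 ≤ k
    · have h1 : i ≤ k := by omega
      have h2 : ¬ (k = i) := by omega
      simp [h, h1, h2]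
    · by_cases h3 : k = i
      · simp [h3]
      · have h4 : ¬ i ≤ k := by omega
        simp [h, h4]
  apply PySem.List.sorted_id_eq_of_perm_of_pairwise
  · refine (List.Perm.append_left _ (PySem.List.sorted_perm _ _ _)).trans ?_
    rw [← h1, ← h2]
    exact List.filter_append_perm _ _
  · rw [List.pairwise_append]
    refine ⟨List.pairwise_replicate.mpr (by simp), PySem.List.sorted_pairwise _ _, ?_⟩
    intro a ha b hb
    have ha' : a = i := List.eq_of_mem_replicate ha
    have hb' : i + 1 ≤ b := by
      have hmem := (PySem.List.mem_sorted _ _ _ _).mp hb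
      have := List.of_mem_filter hmem
      simpa using this
    omega

-- a run of c+1 copies of a key behaves like a single visit of that key
lemma goB_replicate (ft : List (Int × String)) (maxF i : Int) (rest : List Int)
    (last : Option Int) (c : Nat) :
    goB ft maxF (List.replicate (c + 1) i ++ rest) last
      = if pvGet ft i = some "I" ∧ last.isSome then last.getD maxF
        else goB ft maxF rest (if pvGet ft i = some "P" then some i else last) := by
  induction c generalizing last with
  | zero => simp [goB]
  | succ c ih =>
    have : List.replicate (c + 1 + 1) i ++ rest = i :: (List.replicate (c + 1) i ++ rest) := by
      simp [List.replicate_succ]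
    rw [this, goB]
    by_cases hI : pvGet ft i = some "I"
    · have hP : ¬ pvGet ft i = some "P" := by simp [hI]
      by_cases hs : last.isSome
      · simp [hI, hs]
      · simp only [hI, hs, ih]
        simp [hs]
    · by_cases hP : pvGet ft i = some "P"
      · simp [hP, ih]
      · simp [hI, hP, ih]

lemma main_loop (ft : List (Int × String)) (maxF : Int)
    (hmax : ∀ k ∈ ft.map Prod.fst, k ≤ maxF) :
    ∀ (n : Nat) (i : Int) (last : Option Int), (maxF + 1 - i).toNat ≤ n →
    goA ft maxF i last
      = goB ft maxF
          (PySem.List.sorted ((ft.map Prod.fst).filter (fun k => decide (i ≤ k))) (fun x => x) false)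
          last := by
  intro n
  induction n with
  | zero =>
    intro i last hn
    have hgt : ¬ i ≤ maxF := by omega
    have hf : (ft.map Prod.fst).filter (fun k => decide (i ≤ k)) = [] := by
      rw [List.filter_eq_nil_iff]
      intro k hk
      have := hmax k hk
      simp only [decide_eq_true_eq]
      omega
    rw [goA, if_neg hgt, hf]
    rfl
  | succ n ih =>
    intro i last hn
    by_cases hle : i ≤ maxF
    · rw [goA, if_pos hle, sorted_filter_step]
      rcases hc : (ft.map Prod.fst).count i with _ | c
      · -- key i absent: both loops skip straight past i
        have hnone : pvGet ft i = none :=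
          pvGet_eq_none_of_not_mem ft i (by
            intro hmem
            have := List.count_pos_iff.mpr hmem
            omega)
        rw [List.replicate_zero, List.nil_append, if_neg (by simp [hnone]), hnone,
          if_neg (by simp)]
        exact ih (i + 1) last (by omega)
      · rw [goB_replicate]
        by_cases hI : pvGet ft i = some "I" ∧ last.isSome
        · rw [if_pos hI, if_pos hI]
        · rw [if_neg hI, if_neg hI]
          exact ih (i + 1) _ (by omega)
    · have hf : (ft.map Prod.fst).filter (fun k => decide (i ≤ k)) = [] := by
        rw [List.filter_eq_nil_iff]
        intro k hk
        have := hmax k hk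
        simp only [decide_eq_true_eq]
        omega
      rw [goA, if_neg hle, hf]
      rfl

-- ===== VERDICT (by name: the statement is the Claim_ definition above) =====
theorem find_last_p_frame_before_next_i_spec : Claim_equal_find_last_p_frame_before_next_i := by
  intro frame_num frame_types _ hpre
  unfold Spec_find_last_p_frame_before_next_i
  unfold find_last_p_frame_before_next_i find_last_p_frame_before_next_i_alt
  rcases hm : PySem.List.max? (frame_types.map Prod.fst) (fun x => x) with _ | maxF
  · exact absurd (by simpa using (PySem.List.max?_eq_none_iff _ _).mp hm) hpre
  · exact main_loop frame_types maxF (fun k hk => PySem.List.max?_isMax hm k hk)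
      (maxF + 1 - frame_num).toNat frame_num none le_rfl
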